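-- pv_equiv track=rewrite | github.com/bharathramh92/easy-ecom | categories/category_dict.py | get_end_categories
-- ===== SOURCE A (Python) =====
-- category = {
--     'parent_id': None,
--     "Books":
--         {
--             'parent_id': 1,
--             'Engineering & Transportation':
--                  {
--                      'parent_id': 2,
--                      'Engineering':
--                       {
--                           'parent_id': 3,
--                           'Electrical & Electronics':
--                            {
--                                'parent_id': 4,
--                                'Electronics' :
--                                    {
--                                        'parent_id': 5,
--                                        'Opto Electronics' :
--                                            {
--                                                'parent_id':6,
--                                            },
--                                        'Transistors' :
--                                            {
--                                                'parent_id':7,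
--                                            },
--                                        'Solid State' :
--                                            {
--                                                'parent_id':8,
--                                            },
--                                        'Semiconductors':
--                                            {
--                                                'parent_id':9,
--                                            }
--                                    },
--                            },
--                       },
--                   },
--             'Science & Math':
--                 {
--                     'parent_id': 1,
--                     'Mathematics':
--                         {
--                             'parent_id': 11,
--                             'Infinity':{
--                                 'parent_id':12,
--                             },
--                             'Matrics':
--                                 {
--                                     'parent_id':13,
--                                 },
--                             'Trigonometry' :
--                                 {
--                                 'parent_id':14,
--                                 },
--                         },
--                     'Physics':
--                         {
--                             'parent_id':15,
--                         },
--                 },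
--              },
-- }
--
-- def get_end_categories(path):
--     """
--     path should be like "Books > Engineering & Transportation >  Engineering". ie space to left and right of > symbol.
--     :param path:
--     :return: returns dict with key names as category names and id as their value
--     """
--     categories = {}
--     path = path.split(' > ')
--     category_data = category
--     while True:
--         try:
--             #Getting in to the given path in dict.
--             category_data = category_data[path.pop(0)]
--         except Exception:
--             break
--     def go_below(category_data):
--         for k, v in category_data.items():
--             if k not in ['parent_id']:
--                 if len(v)==1:
--                     categories[k] = v['parent_id']
--                 else:
--                     go_below(category_data[k])
--     go_below(category_data)
--     return categories
-- ===== SOURCE B (Python) =====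
-- category = {
--     'parent_id': None,
--     "Books":
--         {
--             'parent_id': 1,
--             'Engineering & Transportation':
--                  {
--                      'parent_id': 2,
--                      'Engineering':
--                       {
--                           'parent_id': 3,
--                           'Electrical & Electronics':
--                            {
--                                'parent_id': 4,
--                                'Electronics' :
--                                    {
--                                        'parent_id': 5,
--                                        'Opto Electronics' :
--                                            {
--                                                'parent_id':6,
--                                            },
--                                        'Transistors' :
--                                            {
--                                                'parent_id':7,
--                                            },
--                                        'Solid State' :
--                                            {
--                                                'parent_id':8,
--                                            },
--                                        'Semiconductors':
--                                            {
--                                                'parent_id':9,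
--                                            }
--                                    },
--                            },
--                       },
--                   },
--             'Science & Math':
--                 {
--                     'parent_id': 1,
--                     'Mathematics':
--                         {
--                             'parent_id': 11,
--                             'Infinity':{
--                                 'parent_id':12,
--                             },
--                             'Matrics':
--                                 {
--                                     'parent_id':13,
--                                 },
--                             'Trigonometry' :
--                                 {
--                                 'parent_id':14,
--                                 },
--                         },
--                     'Physics':
--                         {
--                             'parent_id':15,
--                         },
--                 },
--              },
-- }
--
-- def get_end_categories(path):
--     # Descend along the path with .get() instead of exception-driven pop(),
--     # then collect leaves with an explicit-stack DFS instead of recursion.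
--     node = category
--     for seg in path.split(' > '):
--         child = node.get(seg)
--         if not isinstance(child, dict):
--             break
--         node = child
--     categories = {}
--     stack = [(k, v) for k, v in reversed(list(node.items())) if k != 'parent_id']
--     while stack:
--         k, v = stack.pop()
--         if len(v) == 1:
--             categories[k] = v['parent_id']
--         else:
--             stack.extend((ck, cv) for ck, cv in reversed(list(v.items())) if ck != 'parent_id')
--     return categories
-- ===== Notes on version B (the rewrite author's own statement) =====
-- stated objective: alternative
-- what changed: The exception-driven while/pop(0) descent becomes a .get()-based for-loop over the path segments, and the recursive go_below closure becomes an explicit-stack iterative DFS (children pushed reversed so the output dict's insertion order is identical).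
import Mathlib
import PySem

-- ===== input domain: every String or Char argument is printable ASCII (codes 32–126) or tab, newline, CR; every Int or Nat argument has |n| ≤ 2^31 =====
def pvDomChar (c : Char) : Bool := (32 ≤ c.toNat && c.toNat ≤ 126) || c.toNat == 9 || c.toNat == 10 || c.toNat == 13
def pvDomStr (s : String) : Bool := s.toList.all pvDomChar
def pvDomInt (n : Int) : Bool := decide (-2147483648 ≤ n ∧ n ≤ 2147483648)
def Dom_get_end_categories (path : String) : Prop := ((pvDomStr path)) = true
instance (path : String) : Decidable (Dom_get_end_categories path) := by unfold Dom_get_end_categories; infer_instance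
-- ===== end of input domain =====

-- B replaces A's recursive leaf collector with an explicit-stack DFS and A's
-- exception-driven pop(0) descent with a .get()-based for-loop (objective: alternative).

-- ===== PORT A =====
-- The fixed module-level `category` dict, encoded by node index (an explicit
-- index encoding; the nested dicts hold values of mixed types, so they cannot be a
-- Lean inductive under the type convention).
-- Node indices: 0 root, 1 Books, 2 Engineering & Transportation, 3 Engineering,
-- 4 Electrical & Electronics, 5 Electronics, 6 Opto Electronics, 7 Transistors,
-- 8 Solid State, 9 Semiconductors, 10 Science & Math, 11 Mathematics,
-- 12 Infinity, 13 Matrics, 14 Trigonometry, 15 Physics.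
-- catChildren n = node n's items WITHOUT the leading 'parent_id' key, in dict order.
def catChildren : Nat → List (String × Nat)
  | 0 => [("Books", 1)]
  | 1 => [("Engineering & Transportation", 2), ("Science & Math", 10)]
  | 2 => [("Engineering", 3)]
  | 3 => [("Electrical & Electronics", 4)]
  | 4 => [("Electronics", 5)]
  | 5 => [("Opto Electronics", 6), ("Transistors", 7), ("Solid State", 8), ("Semiconductors", 9)]
  | 10 => [("Mathematics", 11), ("Physics", 15)]
  | 11 => [("Infinity", 12), ("Matrics", 13), ("Trigonometry", 14)]
  | _ => []

-- catParent n = node n's 'parent_id' value. The root's parent_id is None in Python;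
-- neither program ever reads it on an input admitted by Pre_, so the root (and
-- out-of-range indices) get an arbitrary 0 here.
def catParent : Nat → Int
  | 1 => 1 | 2 => 2 | 3 => 3 | 4 => 4 | 5 => 5 | 6 => 6 | 7 => 7 | 8 => 8 | 9 => 9
  | 10 => 1 | 11 => 11 | 12 => 12 | 13 => 13 | 14 => 14 | 15 => 15
  | _ => 0

-- A's `while True: category_data = category_data[path.pop(0)]` with `except: break`.
-- State: `some n` = currently at dict node n; `none` = currently at a parent_id
-- scalar (int/None). Subscripting a scalar raises (caught, loop breaks); looking up
-- 'parent_id' in a dict succeeds and moves to the scalar; a missing key breaks.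
def descendA : Option Nat → List String → Option Nat
  | st, [] => st                                -- path.pop(0) raises IndexError → break
  | none, _ :: _ => none                        -- scalar[key] raises TypeError → break
  | some n, s :: rest =>
      if s = "parent_id" then descendA none rest
      else
        match (catChildren n).find? (fun p => p.1 == s) with
        | some p => descendA (some p.2) rest
        | none => some n                        -- KeyError → break

-- A's recursive go_below. Iterating category_data.items() minus the skipped
-- 'parent_id' key is iterating catChildren; len(v) == 1 ⟺ the child has no
-- children of its own. fuel only bounds the recursion depth for Lean
-- (the tree's depth is ≤ 7 < 16, so it is never exhausted).
def goBelowA : Nat → PySem.Dict String Int → Nat → PySem.Dict String Int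
  | 0, acc, _ => acc
  | fuel + 1, acc, n =>
      (catChildren n).foldl
        (fun acc p =>
          if (catChildren p.2).isEmpty then acc.insert p.1 (catParent p.2)
          else goBelowA fuel acc p.2)
        acc

def get_end_categories (path : String) : List (String × Int) :=
  match descendA (some 0) ((PySem.Str.split? path " > ").getD []) with
  | some n => (goBelowA 16 PySem.Dict.empty n).items
  | none => []   -- here Python raises AttributeError (no .items on a scalar); outside Pre_

-- ===== PORT B =====
-- B's descent: child = node.get(seg); break unless child is a dict. A looked-up value
-- is a dict exactly when seg names a sub-category ('parent_id' maps to a scalar, a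
-- missing key gives None), i.e. exactly when find? over catChildren succeeds.
def descendB : Nat → List String → Nat
  | n, [] => n
  | n, s :: rest =>
      match (catChildren n).find? (fun p => p.1 == s) with
      | some p => descendB p.2 rest
      | none => n

-- B's explicit-stack DFS. The Python pops from the END of the list and pushes each
-- node's non-parent_id items REVERSED; here the list head is the stack top, so the
-- pop takes the head and the extend prepends catChildren in order. fuel bounds the
-- iteration count for Lean (at most 15 entries are ever pushed; 32 is never exhausted).
def loopB : Nat → PySem.Dict String Int → List (String × Nat) → PySem.Dict String Int
  | 0, categories, _ => categories
  | _ + 1, categories, [] => categories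
  | fuel + 1, categories, (k, c) :: rest =>
      if (catChildren c).isEmpty then loopB fuel (categories.insert k (catParent c)) rest
      else loopB fuel categories (catChildren c ++ rest)

def get_end_categories_alt (path : String) : List (String × Int) :=
  (loopB 32 PySem.Dict.empty (catChildren (descendB 0 ((PySem.Str.split? path " > ").getD [])))).items

-- ===== PRECONDITION & SPEC =====
-- pvBadPrefixes: for every node of the fixed `category` tree, its root-to-node key
-- chain followed by the literal segment 'parent_id'. A path's descent steps onto the
-- parent_id scalar (and A then raises AttributeError calling .items() on it) exactly
-- when the path's ' > '-split segment list starts with one of these 16 literal lists.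
def pvBadPrefixes : List (List String) :=
  [["parent_id"],
   ["Books", "parent_id"],
   ["Books", "Engineering & Transportation", "parent_id"],
   ["Books", "Engineering & Transportation", "Engineering", "parent_id"],
   ["Books", "Engineering & Transportation", "Engineering", "Electrical & Electronics", "parent_id"],
   ["Books", "Engineering & Transportation", "Engineering", "Electrical & Electronics", "Electronics", "parent_id"],
   ["Books", "Engineering & Transportation", "Engineering", "Electrical & Electronics", "Electronics", "Opto Electronics", "parent_id"],
   ["Books", "Engineering & Transportation", "Engineering", "Electrical & Electronics", "Electronics", "Transistors", "parent_id"],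
   ["Books", "Engineering & Transportation", "Engineering", "Electrical & Electronics", "Electronics", "Solid State", "parent_id"],
   ["Books", "Engineering & Transportation", "Engineering", "Electrical & Electronics", "Electronics", "Semiconductors", "parent_id"],
   ["Books", "Science & Math", "parent_id"],
   ["Books", "Science & Math", "Mathematics", "parent_id"],
   ["Books", "Science & Math", "Mathematics", "Infinity", "parent_id"],
   ["Books", "Science & Math", "Mathematics", "Matrics", "parent_id"],
   ["Books", "Science & Math", "Mathematics", "Trigonometry", "parent_id"],
   ["Books", "Science & Math", "Physics", "parent_id"]]

-- Pre_ excludes EXACTLY the paths on which A raises (AttributeError: the descent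
-- steps onto the 'parent_id' scalar and .items() is called on it); on every other
-- path A returns normally and B is proved equal.
def Pre_get_end_categories (path : String) : Prop :=
  ∀ p ∈ pvBadPrefixes, ¬ p <+: (PySem.Str.split? path " > ").getD []
instance (path : String) : Decidable (Pre_get_end_categories path) := by
  unfold Pre_get_end_categories; infer_instance

def pvWitness_get_end_categories : String := "Books > Science & Math"

def Spec_get_end_categories (path : String) (out : List (String × Int)) : Prop := out = get_end_categories_alt path
instance (path : String) (out : List (String × Int)) : Decidable (Spec_get_end_categories path out) := by unfold Spec_get_end_categories; infer_instance

-- ===== CLAIM (what is proved, stated in full; the proofs are below) =====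
def Claim_equal_get_end_categories : Prop := ∀ (path : String), Dom_get_end_categories path → Pre_get_end_categories path → Spec_get_end_categories path (get_end_categories path)

-- ===== LEMMAS AND PROOFS =====

-- Every child index in the tree is at most 15.
theorem catChildren_le (n : Nat) (p : String × Nat) (h : p ∈ catChildren n) : p.2 ≤ 15 := by
  unfold catChildren at h
  split at h <;> simp_all <;> rcases h with h | h | h | h <;> simp_all

-- badFrom n: the crash-triggering segment prefixes as seen FROM node n (the suffixes
-- of pvBadPrefixes entries whose chain passes through n); badFrom 0 = pvBadPrefixes.
def badFrom : Nat → List (List String)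
  | 0 => pvBadPrefixes
  | 1 => [["parent_id"], ["Engineering & Transportation", "parent_id"], ["Engineering & Transportation", "Engineering", "parent_id"], ["Engineering & Transportation", "Engineering", "Electrical & Electronics", "parent_id"], ["Engineering & Transportation", "Engineering", "Electrical & Electronics", "Electronics", "parent_id"], ["Engineering & Transportation", "Engineering", "Electrical & Electronics", "Electronics", "Opto Electronics", "parent_id"], ["Engineering & Transportation", "Engineering", "Electrical & Electronics", "Electronics", "Transistors", "parent_id"], ["Engineering & Transportation", "Engineering", "Electrical & Electronics", "Electronics", "Solid State", "parent_id"], ["Engineering & Transportation", "Engineering", "Electrical & Electronics", "Electronics", "Semiconductors", "parent_id"], ["Science & Math", "parent_id"], ["Science & Math", "Mathematics", "parent_id"], ["Science & Math", "Mathematics", "Infinity", "parent_id"], ["Science & Math", "Mathematics", "Matrics", "parent_id"], ["Science & Math", "Mathematics", "Trigonometry", "parent_id"], ["Science & Math", "Physics", "parent_id"]]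
  | 2 => [["parent_id"], ["Engineering", "parent_id"], ["Engineering", "Electrical & Electronics", "parent_id"], ["Engineering", "Electrical & Electronics", "Electronics", "parent_id"], ["Engineering", "Electrical & Electronics", "Electronics", "Opto Electronics", "parent_id"], ["Engineering", "Electrical & Electronics", "Electronics", "Transistors", "parent_id"], ["Engineering", "Electrical & Electronics", "Electronics", "Solid State", "parent_id"], ["Engineering", "Electrical & Electronics", "Electronics", "Semiconductors", "parent_id"]]
  | 3 => [["parent_id"], ["Electrical & Electronics", "parent_id"], ["Electrical & Electronics", "Electronics", "parent_id"], ["Electrical & Electronics", "Electronics", "Opto Electronics", "parent_id"], ["Electrical & Electronics", "Electronics", "Transistors", "parent_id"], ["Electrical & Electronics", "Electronics", "Solid State", "parent_id"], ["Electrical & Electronics", "Electronics", "Semiconductors", "parent_id"]]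
  | 4 => [["parent_id"], ["Electronics", "parent_id"], ["Electronics", "Opto Electronics", "parent_id"], ["Electronics", "Transistors", "parent_id"], ["Electronics", "Solid State", "parent_id"], ["Electronics", "Semiconductors", "parent_id"]]
  | 5 => [["parent_id"], ["Opto Electronics", "parent_id"], ["Transistors", "parent_id"], ["Solid State", "parent_id"], ["Semiconductors", "parent_id"]]
  | 10 => [["parent_id"], ["Mathematics", "parent_id"], ["Mathematics", "Infinity", "parent_id"], ["Mathematics", "Matrics", "parent_id"], ["Mathematics", "Trigonometry", "parent_id"], ["Physics", "parent_id"]]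
  | 11 => [["parent_id"], ["Infinity", "parent_id"], ["Matrics", "parent_id"], ["Trigonometry", "parent_id"]]
  | _ => [["parent_id"]]

theorem badFrom_root : badFrom 0 = pvBadPrefixes := rfl

-- 'parent_id' is a crash prefix at every node.
theorem badFrom_head (n : Nat) : ["parent_id"] ∈ badFrom n := by
  unfold badFrom; split <;> exact List.mem_cons_self ..

-- A crash suffix of a child lifts, with the child's key consed on, to its parent.
theorem badFrom_child (n : Nat) (hn : n ≤ 15) (k : String) (c : Nat)
    (hc : (k, c) ∈ catChildren n) :
    ∀ q ∈ badFrom c, (k :: q) ∈ badFrom n := by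
  interval_cases n <;> fin_cases hc <;> decide

-- On a segment list with no crash prefix at node n, A's descent stays on dict nodes
-- and visits exactly the nodes B's descent visits.
theorem descendA_eq_descendB (segs : List String) (n : Nat) (hn : n ≤ 15)
    (h : ∀ p ∈ badFrom n, ¬ p <+: segs) :
    descendA (some n) segs = some (descendB n segs) := by
  induction segs generalizing n with
  | nil => simp [descendA, descendB]
  | cons s rest ih =>
    by_cases hs : s = "parent_id"
    · exact absurd (by simp [hs]) (h ["parent_id"] (badFrom_head n))
    · simp only [descendA, descendB, if_neg hs]
      cases hf : (catChildren n).find? (fun p => p.1 == s) with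
      | none => rfl
      | some p =>
        have hmem := List.mem_of_find?_eq_some hf
        have hks : p.1 = s := by simpa using List.find?_some hf
        refine ih p.2 (catChildren_le n p hmem) (fun q hq hpre => ?_)
        exact h (s :: q) (hks ▸ badFrom_child n hn p.1 p.2 hmem q hq)
          (List.cons_prefix_cons.mpr ⟨rfl, hpre⟩)

-- B's descent never leaves the 16 tree nodes.
theorem descendB_le (segs : List String) (n : Nat) (h : n ≤ 15) : descendB n segs ≤ 15 := by
  induction segs generalizing n with
  | nil => simpa [descendB]
  | cons s rest ih =>
    simp only [descendB]
    cases hf : (catChildren n).find? (fun p => p.1 == s) with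
    | none => simpa
    | some p => exact ih p.2 (catChildren_le n p (List.mem_of_find?_eq_some hf))

-- At every tree node the two collectors produce the same dict (checked by evaluation).
theorem collect_eq (n : Nat) (h : n ≤ 15) :
    (goBelowA 16 PySem.Dict.empty n).items = (loopB 32 PySem.Dict.empty (catChildren n)).items := by
  interval_cases n <;> decide

-- ===== VERDICT (by name: the statement is the Claim_ definition above) =====
theorem get_end_categories_spec : Claim_equal_get_end_categories := by
  intro path _ hpre
  unfold Pre_get_end_categories at hpre
  unfold Spec_get_end_categories get_end_categories get_end_categories_alt
  rw [descendA_eq_descendB _ 0 (by omega) (badFrom_root ▸ hpre)]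
  exact collect_eq _ (descendB_le _ 0 (by omega))
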